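-- pv_equiv track=rewrite | github.com/ayiinee/anabool | backend/app/ai/rag/chunking.py | _carry_overlap_words
-- ===== SOURCE A (Python) =====
-- def _carry_overlap_words(words: list[str], overlap_chars: int) -> list[str]:
--     if overlap_chars == 0 or not words:
--         return []
--
--     kept_words: list[str] = []
--     for word in reversed(words):
--         kept_words.insert(0, word)
--         if len(" ".join(kept_words)) >= overlap_chars:
--             break
--
--     return kept_words
-- ===== SOURCE B (Python) =====
-- def _carry_overlap_words(words: list[str], overlap_chars: int) -> list[str]:
--     if overlap_chars == 0 or not words:
--         return []
--     # Prefix sums of word lengths: prefix[i] = sum(len(w) for w in words[:i]).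
--     prefix = [0]
--     for w in words:
--         prefix.append(prefix[-1] + len(w))
--     n = len(words)
--     total = prefix[n] + n - 1  # len(" ".join(words))
--     # len(" ".join(words[i:])) = total - prefix[i] - i, strictly decreasing in i.
--     # Binary search for the largest start i whose suffix still reaches overlap_chars.
--     lo, hi, best = 0, n - 1, 0
--     while lo <= hi:
--         mid = (lo + hi) // 2
--         if total - prefix[mid] - mid >= overlap_chars:
--             best = mid
--             lo = mid + 1
--         else:
--             hi = mid - 1
--     return words[best:]
-- ===== Notes on version B (the rewrite author's own statement) =====
-- stated objective: faster
-- what changed: B precomputes a prefix-sum array of word lengths in one pass, expresses the joined length of any suffix in O(1) as total - prefix[i] - i, and binary-searches (exploiting its monotone decrease in i) for the largest suffix start still reaching overlap_chars, then slices once; A instead grows the kept list from the back, rebuilding and re-joining it every iteration.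
import Mathlib
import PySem

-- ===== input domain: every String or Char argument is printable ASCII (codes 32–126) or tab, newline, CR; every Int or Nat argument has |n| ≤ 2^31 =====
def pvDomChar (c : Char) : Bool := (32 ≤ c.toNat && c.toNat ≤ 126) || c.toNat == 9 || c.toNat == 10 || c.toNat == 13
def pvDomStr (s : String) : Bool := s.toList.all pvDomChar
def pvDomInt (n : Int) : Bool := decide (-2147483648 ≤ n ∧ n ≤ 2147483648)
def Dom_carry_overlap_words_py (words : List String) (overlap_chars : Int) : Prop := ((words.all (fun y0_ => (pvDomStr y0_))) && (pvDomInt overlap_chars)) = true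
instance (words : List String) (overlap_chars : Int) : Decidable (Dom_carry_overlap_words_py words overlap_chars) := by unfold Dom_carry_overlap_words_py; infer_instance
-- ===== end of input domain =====

-- B replaces A's grow-and-rejoin loop by pref sums of word lengths plus a binary
-- search for the suffix start (faster: the check times it; see claim.json).

-- ===== PORT A =====
def pvALoop (overlap_chars : Int) : List String → List String → List String
  | [], kept => kept
  | w :: rest, kept =>
    let kept' := w :: kept
    if PySem.Str.len (PySem.Str.join " " kept') ≥ overlap_chars then kept'
    else pvALoop overlap_chars rest kept'

def carry_overlap_words_py (words : List String) (overlap_chars : Int) : List String :=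
  if overlap_chars = 0 ∨ words = [] then []
  else pvALoop overlap_chars words.reverse []

-- ===== PORT B =====
-- pref = [0]; for w in words: pref.append(pref[-1] + len(w))
def pvBuildPrefix (words : List String) : List Int :=
  words.foldl (fun pre w => pre ++ [PySem.List.pyGetD pre (-1) 0 + PySem.Str.len w]) [0]

-- while lo <= hi: mid = (lo+hi)//2; test; move lo/hi (indexing pref[mid] is always in range)
def pvBSearch (overlap_chars total : Int) (pref : List Int) (lo hi best : Int) : Int :=
  if h : lo ≤ hi then
    let mid := PySem.Int.floordiv (lo + hi) 2
    if total - PySem.List.pyGetD pref mid 0 - mid ≥ overlap_chars then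
      pvBSearch overlap_chars total pref (mid + 1) hi mid
    else
      pvBSearch overlap_chars total pref lo (mid - 1) best
  else best
termination_by (hi + 1 - lo).toNat
decreasing_by
  · have := PySem.Int.floordiv_two_mid_bounds h; omega
  · have := PySem.Int.floordiv_two_mid_bounds h; omega

def carry_overlap_words_py_alt (words : List String) (overlap_chars : Int) : List String :=
  if overlap_chars = 0 ∨ words = [] then []
  else
    let pref := pvBuildPrefix words
    let n : Int := words.length
    let total := PySem.List.pyGetD pref n 0 + n - 1
    let best := pvBSearch overlap_chars total pref 0 (n - 1) 0
    PySem.List.slice words (some best) none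

-- ===== PRECONDITION & SPEC =====
def Spec_carry_overlap_words_py (words : List String) (overlap_chars : Int) (out : List String) : Prop := out = carry_overlap_words_py_alt words overlap_chars
instance (words : List String) (overlap_chars : Int) (out : List String) : Decidable (Spec_carry_overlap_words_py words overlap_chars out) := by unfold Spec_carry_overlap_words_py; infer_instance

-- ===== CLAIM (what is proved, stated in full; the proofs are below) =====
def Claim_equal_carry_overlap_words_py : Prop := ∀ (words : List String) (overlap_chars : Int), Dom_carry_overlap_words_py words overlap_chars → Spec_carry_overlap_words_py words overlap_chars (carry_overlap_words_py words overlap_chars)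

-- ===== LEMMAS AND PROOFS =====

-- sum of word lengths
def pvPsum (l : List String) : Int := (l.map PySem.Str.len).sum
-- length of " ".join l, with the convention pvS [] = -1
def pvS (l : List String) : Int := pvPsum l + l.length - 1

theorem pvPsum_nonneg (l : List String) : 0 ≤ pvPsum l := by
  induction l with
  | nil => simp [pvPsum]
  | cons w r ih =>
    have : 0 ≤ PySem.Str.len w := by simp [PySem.Str.len_eq]
    simp only [pvPsum, List.map_cons, List.sum_cons]
    have := ih
    simp only [pvPsum] at this
    omega

theorem pvS_cons (w : String) (l : List String) :
    pvS (w :: l) = pvS l + PySem.Str.len w + 1 := by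
  simp only [pvS, pvPsum, List.map_cons, List.sum_cons, List.length_cons]
  push_cast; ring

theorem pvJoin_len (w : String) (kept : List String) :
    PySem.Str.len (PySem.Str.join " " (w :: kept)) = pvS (w :: kept) := by
  induction kept generalizing w with
  | nil =>
    simp [pvS, pvPsum, PySem.Str.len_eq, PySem.Str.toList_join, PySem.Chars.join_singleton]
  | cons x r ih =>
    have := ih x
    simp only [PySem.Str.len_eq, PySem.Str.toList_join, List.map_cons,
      PySem.Chars.join_cons_cons] at this ⊢
    rw [pvS_cons]
    simp only [PySem.Str.len_eq] at *
    simp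
    simp at this
    omega

-- A's loop counted: pvCount returns k + (number of words consumed before the break)
def pvCount (overlap_chars : Int) : List String → Int → Nat → Nat
  | [], _, k => k
  | w :: rest, total, k =>
    let total' := total + PySem.Str.len w + 1
    if total' ≥ overlap_chars then k + 1
    else pvCount overlap_chars rest total' (k + 1)

theorem pvCount_shift (ov : Int) (l : List String) (t : Int) (k : Nat) :
    pvCount ov l t k = k + pvCount ov l t 0 := by
  induction l generalizing t k with
  | nil => simp [pvCount]
  | cons w rest ih =>
    simp only [pvCount]
    split_ifs with h
    · rfl
    · rw [ih _ (k + 1), ih _ 1]; omega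

-- A's loop produces the reversed taken pref of the reversed word list
theorem pvALoop_eq (ov : Int) (rev : List String) :
    ∀ kept : List String,
      pvALoop ov rev kept =
        (rev.take (pvCount ov rev (pvS kept) 0)).reverse ++ kept := by
  induction rev with
  | nil => intro kept; simp [pvALoop, pvCount]
  | cons w rest ih =>
    intro kept
    have hj : pvS kept + PySem.Str.len w + 1 = pvS (w :: kept) := (pvS_cons w kept).symm
    simp only [pvALoop, pvCount, hj, pvJoin_len]
    split_ifs with h
    · simp
    · rw [ih (w :: kept), pvCount_shift ov rest (pvS (w :: kept)) 1, Nat.add_comm 1]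
      simp

-- characterisation of pvCount: bounded, all earlier stops fail, and it stops on a hit or exhausts
theorem pvCount_spec (ov : Int) (l : List String) : ∀ t : Int,
    pvCount ov l t 0 ≤ l.length ∧
    (∀ m : Nat, 1 ≤ m → m < pvCount ov l t 0 → t + pvPsum (l.take m) + m < ov) ∧
    (t + pvPsum (l.take (pvCount ov l t 0)) + pvCount ov l t 0 ≥ ov ∨ pvCount ov l t 0 = l.length) := by
  induction l with
  | nil => intro t; refine ⟨by simp [pvCount], by simp [pvCount], Or.inr rfl⟩
  | cons w rest ih =>
    intro t
    simp only [pvCount]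
    split_ifs with h
    · refine ⟨by simp, ?_, Or.inl ?_⟩
      · intro m h1 h2; omega
      · simpa [pvPsum] using h
    · rw [pvCount_shift ov rest _ 1]
      obtain ⟨hle, hmiss, hend⟩ := ih (t + PySem.Str.len w + 1)
      rw [Nat.add_comm 1 (pvCount ov rest (t + PySem.Str.len w + 1) 0)]
      refine ⟨by simp only [List.length_cons]; omega, ?_, ?_⟩
      · intro m h1 h2
        match m, h1 with
        | 1, _ => simpa [pvPsum] using h
        | (m' + 2), _ =>
          have := hmiss (m' + 1) (by omega) (by omega)
          simp only [List.take_succ_cons, pvPsum, List.map_cons, List.sum_cons] at this ⊢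
          push_cast at this ⊢
          omega
      · rcases hend with hhit | hexh
        · left
          simp only [List.take_succ_cons, pvPsum, List.map_cons, List.sum_cons] at hhit ⊢
          push_cast at hhit ⊢
          omega
        · right; simp only [List.length_cons, hexh]

-- pvPsum is invariant under reverse and splits over take/drop
theorem pvPsum_reverse (l : List String) : pvPsum l.reverse = pvPsum l := by
  simp [pvPsum]
theorem pvPsum_take_drop (l : List String) (i : Nat) :
    pvPsum l = pvPsum (l.take i) + pvPsum (l.drop i) := by
  conv_lhs => rw [← List.take_append_drop i l]
  simp [pvPsum]

-- suffix join length is antitone in the start index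
theorem pvS_drop_antitone (l : List String) (i j : Nat) (hij : i ≤ j) (hj : j ≤ l.length) :
    pvS (l.drop j) ≤ pvS (l.drop i) := by
  have hdd : List.drop (j - i) (List.drop i l) = List.drop j l := by
    rw [List.drop_drop]; congr 1; omega
  have h1 : l.drop i = (l.drop i).take (j - i) ++ l.drop j := by
    conv_lhs => rw [← List.take_append_drop (j - i) (l.drop i)]
    rw [hdd]
  have h2 : pvPsum (l.drop i) = pvPsum ((l.drop i).take (j - i)) + pvPsum (l.drop j) := by
    conv_lhs => rw [h1]
    simp [pvPsum]
  have h3 := pvPsum_nonneg ((l.drop i).take (j - i))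
  simp only [pvS, List.length_drop]
  omega

-- the built pref list is [0] followed by the running sums
def pvPartial : List String → Int → List Int
  | [], _ => []
  | w :: r, s => (s + PySem.Str.len w) :: pvPartial r (s + PySem.Str.len w)

theorem pvBuildPrefix_eq_aux (l : List String) : ∀ (acc : List Int) (s : Int),
    PySem.List.pyGetD acc (-1) 0 = s →
    l.foldl (fun pre w => pre ++ [PySem.List.pyGetD pre (-1) 0 + PySem.Str.len w]) acc
      = acc ++ pvPartial l s := by
  induction l with
  | nil => intro acc s _; simp [pvPartial]
  | cons w r ih =>
    intro acc s hs
    simp only [List.foldl_cons, pvPartial, hs]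
    rw [ih (acc ++ [s + PySem.Str.len w]) (s + PySem.Str.len w)
      (by rw [PySem.List.pyGetD_neg_one_append_singleton])]
    simp

theorem pvBuildPrefix_eq (words : List String) :
    pvBuildPrefix words = 0 :: pvPartial words 0 := by
  unfold pvBuildPrefix
  rw [pvBuildPrefix_eq_aux words [0] 0 (by decide)]
  rfl

theorem pvPartial_getD (l : List String) : ∀ (s : Int) (i : Nat), i ≤ l.length →
    (s :: pvPartial l s).getD i 0 = s + pvPsum (l.take i) := by
  induction l with
  | nil =>
    intro s i hi
    simp only [List.length_nil, Nat.le_zero] at hi; subst hi; simp [pvPsum]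
  | cons w r ih =>
    intro s i hi
    cases i with
    | zero => simp [pvPsum]
    | succ i' =>
      simp only [pvPartial, List.getD_cons_succ, List.take_succ_cons, pvPsum,
        List.map_cons, List.sum_cons]
      rw [ih (s + PySem.Str.len w) i' (by simpa using hi)]
      simp only [pvPsum]; ring

theorem pvPrefix_getD (words : List String) (i : Nat) (hi : i ≤ words.length) :
    (pvBuildPrefix words).getD i 0 = pvPsum (words.take i) := by
  rw [pvBuildPrefix_eq]
  have := pvPartial_getD words 0 i hi
  simpa using this

-- generic binary-search correctness: the loop returns max (c-1) 0 for a threshold c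
theorem pvBSearch_spec (ov total : Int) (pref : List Int) (n c : Int)
    (hc0 : 0 ≤ c)
    (hP : ∀ i : Int, 0 ≤ i → i ≤ n - 1 →
      ((total - PySem.List.pyGetD pref i 0 - i ≥ ov) ↔ i < c)) :
    ∀ (N : Nat) (lo hi best : Int), (hi + 1 - lo).toNat = N →
      0 ≤ lo → lo ≤ c → c - 1 ≤ hi → hi ≤ n - 1 → best = max (lo - 1) 0 →
      pvBSearch ov total pref lo hi best = max (c - 1) 0 := by
  intro N
  induction N using Nat.strong_induction_on with
  | _ N IH =>
    intro lo hi best hN hlo0 hloc hchi hhin hbest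
    rw [pvBSearch]
    split_ifs with hle
    · have hmid := PySem.Int.floordiv_two_mid_bounds hle
      set mid := PySem.Int.floordiv (lo + hi) 2 with hmiddef
      have hiff := hP mid (by omega) (by omega)
      simp only
      split_ifs with htest
      · have hmc : mid < c := hiff.mp htest
        exact IH (hi + 1 - (mid + 1)).toNat (by omega) (mid + 1) hi mid rfl
          (by omega) (by omega) (by omega) (by omega) (by omega)
      · have hmc : c ≤ mid := by
          by_contra hcon
          exact htest (hiff.mpr (by omega))
        exact IH ((mid - 1) + 1 - lo).toNat (by omega) lo (mid - 1) best rfl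
          hlo0 hloc (by omega) (by omega) hbest
    · omega

theorem pvCount_pos (ov : Int) (w : String) (rest : List String) (t : Int) :
    1 ≤ pvCount ov (w :: rest) t 0 := by
  simp only [pvCount]
  split_ifs with h
  · omega
  · rw [pvCount_shift]; omega

-- relate the reversed-prefix sums A's loop sees to suffix sums of words
theorem pvPsum_take_reverse (words : List String) (m : Nat) :
    pvPsum (words.reverse.take m) = pvPsum (words.drop (words.length - m)) := by
  rw [List.take_reverse, pvPsum_reverse]

-- ===== VERDICT (by name: the statement is the Claim_ definition above) =====
theorem carry_overlap_words_py_spec : Claim_equal_carry_overlap_words_py := by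
  intro words ov _
  unfold Spec_carry_overlap_words_py carry_overlap_words_py carry_overlap_words_py_alt
  split_ifs with h
  · rfl
  · have hw : words ≠ [] := fun hn => h (Or.inr hn)
    set n : Nat := words.length with hn
    have hn1 : 1 ≤ n := by
      cases words with
      | nil => exact absurd rfl hw
      | cons a l => simp [hn]
    set k : Nat := pvCount ov words.reverse (-1) 0 with hk
    -- A's side: the loop keeps the last k words
    have hA : pvALoop ov words.reverse [] = words.drop (n - k) := by
      have := pvALoop_eq ov words.reverse []
      have hS0 : pvS ([] : List String) = -1 := rfl
      rw [hS0] at this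
      rw [this, List.take_reverse, List.reverse_reverse]
      simp only [List.append_nil]
      rw [hn, hk]
    have hk1 : 1 ≤ k := by
      obtain ⟨a, l, hal⟩ := List.exists_cons_of_ne_nil (by simpa using hw : words.reverse ≠ [])
      rw [hk, hal]; exact pvCount_pos _ _ _ _
    obtain ⟨hkle, hmiss, hend⟩ := pvCount_spec ov words.reverse (-1)
    rw [← hk] at hmiss hend
    rw [← hk, List.length_reverse, ← hn] at hkle
    rw [List.length_reverse, ← hn] at hend
    -- translate to the suffix predicate P j := pvS (words.drop j) ≥ ov
    have hcond : ∀ m : Nat, m ≤ n → (-1 + pvPsum (words.reverse.take m) + m = pvS (words.drop (n - m))) := by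
      intro m hm
      rw [pvPsum_take_reverse words m, ← hn]
      have hlen : (words.drop (n - m)).length = m := by
        simp [hn]; omega
      simp only [pvS, hlen]
      ring
    have hmiss' : ∀ j : Nat, n - k < j → j ≤ n - 1 → ¬ (pvS (words.drop j) ≥ ov) := by
      intro j h1 h2
      have := hmiss (n - j) (by omega) (by omega)
      rw [hcond (n - j) (by omega)] at this
      have hjj : n - (n - j) = j := by omega
      rw [hjj] at this
      omega
    have hanti : ∀ i j : Nat, i ≤ j → j ≤ n → pvS (words.drop j) ≥ ov → pvS (words.drop i) ≥ ov := by
      intro i j hij hjn hP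
      have := pvS_drop_antitone words i j hij (by omega)
      omega
    -- B's side: prefix sums give every suffix's joined length in one subtraction
    have hpref : ∀ i : Int, 0 ≤ i → i ≤ (n : Int) →
        PySem.List.pyGetD (pvBuildPrefix words) i 0 = pvPsum (words.take i.toNat) := by
      intro i h0 hin
      rw [PySem.List.pyGetD_of_nonneg _ _ h0]
      exact pvPrefix_getD words i.toNat (by omega)
    have hT : ∀ i : Int, 0 ≤ i → i ≤ (n : Int) - 1 →
        ((PySem.List.pyGetD (pvBuildPrefix words) (n : Int) 0 + (n : Int) - 1)
          - PySem.List.pyGetD (pvBuildPrefix words) i 0 - i = pvS (words.drop i.toNat)) := by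
      intro i h0 hin
      rw [hpref (n : Int) (by omega) le_rfl, hpref i h0 (by omega)]
      have hsplit := pvPsum_take_drop words i.toNat
      have hlen : (words.drop i.toNat).length = n - i.toNat := by simp [hn]
      have htk : words.take ((n : Int)).toNat = words := by
        apply List.take_of_length_le; simp [hn]
      rw [htk]
      simp only [pvS, hlen]
      have hii : ((i.toNat : Int)) = i := by omega
      omega
    -- the threshold index c and the binary search
    by_cases hPk : pvS (words.drop (n - k)) ≥ ov
    · -- the loop stopped on a hit: the last k words are kept
      have hP : ∀ i : Int, 0 ≤ i → i ≤ (n : Int) - 1 →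
          (((PySem.List.pyGetD (pvBuildPrefix words) (n : Int) 0 + (n : Int) - 1)
            - PySem.List.pyGetD (pvBuildPrefix words) i 0 - i ≥ ov) ↔ i < ((n - k : Nat) : Int) + 1) := by
        intro i h0 hin
        rw [hT i h0 hin]
        constructor
        · intro hge
          by_contra hcon
          exact hmiss' i.toNat (by omega) (by omega) hge
        · intro hlt
          exact hanti i.toNat (n - k) (by omega) (by omega) hPk
      have hbs := pvBSearch_spec ov
        (PySem.List.pyGetD (pvBuildPrefix words) (n : Int) 0 + (n : Int) - 1)
        (pvBuildPrefix words) (n : Int) (((n - k : Nat) : Int) + 1)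
        (by omega) hP (((n : Int) - 1 + 1 - 0).toNat) 0 ((n : Int) - 1) 0 rfl
        (by omega) (by omega) (by omega) (by omega) (by omega)
      rw [hA]
      show List.drop (n - k) words =
        PySem.List.slice words (some (pvBSearch ov
          (PySem.List.pyGetD (pvBuildPrefix words) ((n : Int)) 0 + (n : Int) - 1)
          (pvBuildPrefix words) 0 ((n : Int) - 1) 0)) none
      rw [hbs]
      have hmax : max (((n - k : Nat) : Int) + 1 - 1) 0 = ((n - k : Nat) : Int) := by omega
      rw [hmax, PySem.List.slice_from _ (by omega)]
      congr 1
    · -- no suffix reaches the threshold: everything is kept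
      have hkn : k = n := by
        rcases hend with hhit | hexh
        · exfalso
          rw [hcond k hkle] at hhit
          exact hPk hhit
        · exact hexh
      have hP : ∀ i : Int, 0 ≤ i → i ≤ (n : Int) - 1 →
          (((PySem.List.pyGetD (pvBuildPrefix words) (n : Int) 0 + (n : Int) - 1)
            - PySem.List.pyGetD (pvBuildPrefix words) i 0 - i ≥ ov) ↔ i < (0 : Int)) := by
        intro i h0 hin
        rw [hT i h0 hin]
        constructor
        · intro hge
          exact absurd (hanti (n - k) i.toNat (by omega) (by omega) hge) hPk
        · intro hlt; omega
      have hbs := pvBSearch_spec ov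
        (PySem.List.pyGetD (pvBuildPrefix words) (n : Int) 0 + (n : Int) - 1)
        (pvBuildPrefix words) (n : Int) 0
        (by omega) hP (((n : Int) - 1 + 1 - 0).toNat) 0 ((n : Int) - 1) 0 rfl
        (by omega) (by omega) (by omega) (by omega) (by omega)
      rw [hA]
      show List.drop (n - k) words =
        PySem.List.slice words (some (pvBSearch ov
          (PySem.List.pyGetD (pvBuildPrefix words) ((n : Int)) 0 + (n : Int) - 1)
          (pvBuildPrefix words) 0 ((n : Int) - 1) 0)) none
      rw [hbs]
      have hmax : max ((0 : Int) - 1) 0 = (0 : Int) := by omega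
      rw [hmax, PySem.List.slice_from _ (by omega)]
      congr 1
      all_goals omega
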